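-- pv_equiv track=rewrite | github.com/nyorf/skillbox-pythonbasic | block13/13.6/task4.py | expnum
-- ===== SOURCE A (Python) =====
-- def expnum(number):
--     counter = 0
--     mantissecounter = 0
--     mantisse = ''
--     order = ''
--     for sym in number:
--         if sym == 'e' or sym == 'E':
--             break
--         mantissecounter += 1
--         mantisse += sym
--     for sym in number:
--         if counter > mantissecounter:
--             order += sym
--         else:
--             counter += 1
--     return mantisse, order
-- ===== SOURCE B (Python) =====
-- def expnum(number):
--     i = next((idx for idx, c in enumerate(number) if c == 'e' or c == 'E'), len(number))
--     return number[:i], number[i+1:]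
-- ===== Notes on version B (the rewrite author's own statement) =====
-- stated objective: faster
-- what changed: Replaces A's two character-by-character loops (which rebuild both halves by repeated string concatenation, the second rescanning the whole string with a counter) with a single search for the delimiter index followed by two slices.
import Mathlib
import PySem

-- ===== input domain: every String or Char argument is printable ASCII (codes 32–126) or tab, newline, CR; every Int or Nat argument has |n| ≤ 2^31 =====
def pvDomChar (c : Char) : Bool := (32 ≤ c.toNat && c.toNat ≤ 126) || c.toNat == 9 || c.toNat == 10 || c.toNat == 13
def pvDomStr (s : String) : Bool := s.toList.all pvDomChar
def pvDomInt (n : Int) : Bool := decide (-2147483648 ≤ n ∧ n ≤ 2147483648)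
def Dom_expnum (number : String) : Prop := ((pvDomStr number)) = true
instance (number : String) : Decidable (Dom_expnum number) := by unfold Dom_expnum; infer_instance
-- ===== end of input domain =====

-- B replaces A's two character-accumulation loops by one delimiter-index search plus two slices (simpler).

-- ===== PORT A =====
-- first loop: accumulate mantissecounter and mantisse until 'e'/'E' (break)
def expnumLoop1 : List Char → Int → String → Int × String
  | [], mc, m => (mc, m)
  | c :: cs, mc, m =>
    if c = 'e' ∨ c = 'E' then (mc, m)
    else expnumLoop1 cs (mc + 1) (m.push c)

-- second loop: counter/order accumulation over the whole string
def expnumLoop2 : List Char → Int → Int → String → String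
  | [], _, _, o => o
  | c :: cs, counter, mc, o =>
    if counter > mc then expnumLoop2 cs counter mc (o.push c)
    else expnumLoop2 cs (counter + 1) mc o

def expnum (number : String) : String × String :=
  let r := expnumLoop1 number.toList 0 ""
  (r.2, expnumLoop2 number.toList 0 r.1 "")

-- ===== PORT B =====
-- i = next((idx for idx, c in enumerate(number) if c == 'e' or c == 'E'), len(number))
def expnumFindE : List Char → Int → Int
  | [], idx => idx
  | c :: cs, idx => if c = 'e' ∨ c = 'E' then idx else expnumFindE cs (idx + 1)

def expnum_alt (number : String) : String × String :=
  let i := expnumFindE number.toList 0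
  (PySem.Str.slice number none (some i), PySem.Str.slice number (some (i + 1)) none)

-- ===== PRECONDITION & SPEC =====
def Spec_expnum (number : String) (out : String × String) : Prop := out = expnum_alt number
instance (number : String) (out : String × String) : Decidable (Spec_expnum number out) := by unfold Spec_expnum; infer_instance

-- ===== CLAIM (what is proved, stated in full; the proofs are below) =====
def Claim_equal_expnum : Prop := ∀ (number : String), Dom_expnum number → Spec_expnum number (expnum number)

-- ===== LEMMAS AND PROOFS =====

-- index of the first 'e'/'E', or the length if absent
def eIdx : List Char → Nat
  | [] => 0
  | c :: cs => if c = 'e' ∨ c = 'E' then 0 else eIdx cs + 1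

theorem expnumFindE_eq (l : List Char) : ∀ n : Int, expnumFindE l n = n + (eIdx l : Int) := by
  induction l with
  | nil => intro n; simp [expnumFindE, eIdx]
  | cons c cs ih =>
    intro n
    by_cases h : c = 'e' ∨ c = 'E' <;> simp [expnumFindE, eIdx, h, ih] <;> push_cast <;> ring

theorem expnumLoop1_eq (l : List Char) : ∀ (mc : Int) (m : String),
    expnumLoop1 l mc m = (mc + (eIdx l : Int), String.ofList (m.toList ++ l.take (eIdx l))) := by
  induction l with
  | nil => intro mc m; simp [expnumLoop1, eIdx]
  | cons c cs ih =>
    intro mc m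
    by_cases h : c = 'e' ∨ c = 'E'
    · simp [expnumLoop1, eIdx, h]
    · rw [expnumLoop1, if_neg h, ih]
      refine Prod.ext ?_ ?_
      · show mc + 1 + (eIdx cs : Int) = mc + (eIdx (c :: cs) : Int)
        simp [eIdx, h]; push_cast; ring
      · show String.ofList ((m.push c).toList ++ cs.take (eIdx cs)) = _
        simp [eIdx, h, String.toList_push, List.take_succ_cons]

theorem expnumLoop2_gt (l : List Char) : ∀ (c mc : Int) (o : String), mc < c →
    expnumLoop2 l c mc o = String.ofList (o.toList ++ l) := by
  induction l with
  | nil => intro c mc o h; simp [expnumLoop2]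
  | cons x xs ih =>
    intro c mc o h
    rw [expnumLoop2, if_pos h, ih _ _ _ h]
    simp [String.toList_push]

theorem expnumLoop2_le (l : List Char) : ∀ (c mc : Int) (o : String), 0 ≤ c → c ≤ mc →
    expnumLoop2 l c mc o = String.ofList (o.toList ++ l.drop ((mc - c).toNat + 1)) := by
  induction l with
  | nil => intro c mc o h0 h; simp [expnumLoop2]
  | cons x xs ih =>
    intro c mc o h0 h
    rw [expnumLoop2, if_neg (by omega : ¬ c > mc)]
    by_cases h1 : c + 1 ≤ mc
    · rw [ih _ _ _ (by omega) h1]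
      have h2 : (mc - c).toNat = (mc - (c + 1)).toNat + 1 := by omega
      simp [h2]
    · rw [expnumLoop2_gt _ _ _ _ (by omega : mc < c + 1)]
      have h2 : (mc - c).toNat = 0 := by omega
      simp [h2]

-- ===== VERDICT (by name: the statement is the Claim_ definition above) =====
theorem expnum_spec : Claim_equal_expnum := by
  intro number _
  unfold Spec_expnum expnum expnum_alt
  simp only [expnumLoop1_eq, expnumFindE_eq, zero_add]
  refine Prod.ext ?_ ?_
  · apply String.toList_inj.mp
    rw [PySem.Str.toList_slice]
    simp [PySem.List.slice_to_natCast]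
  · show expnumLoop2 number.toList 0 (eIdx number.toList : Int) "" = _
    apply String.toList_inj.mp
    rw [expnumLoop2_le _ _ _ _ (by omega) (by positivity)]
    have h1 : ((eIdx number.toList : Int) + 1) = ((eIdx number.toList + 1 : Nat) : Int) := by
      push_cast; ring
    rw [h1]
    simp only [PySem.Str.toList_slice, PySem.Chars.slice_eq_listSlice,
      PySem.List.slice_from_natCast]
    simp
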